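-- pv_equiv track=rewrite | github.com/Sefalilohani/PWC-updates | scripts/send_pwc_update.py | format_pivot_table
-- ===== SOURCE A (Python) =====
-- SEV_ORDER = ["0-1", "2 - 3", "4 - 5", "6 - 7", "8 - 14", "15 - 30", "31 - 90", "90+"]
--
-- def format_pivot_table(pivot):
--     combos = sorted(set(c for sev_data in pivot.values() for c in sev_data))
--     sevs   = [s for s in SEV_ORDER if s in pivot]
--
--     sev_short = {
--         "0-1": "0-1", "2 - 3": "2-3", "4 - 5": "4-5", "6 - 7": "6-7",
--         "8 - 14": "8-14", "15 - 30": "15-30", "31 - 90": "31-90", "90+": "90+",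
--     }
--
--     def abbrev(combo):
--         check, _, vtype = combo.partition(" | ")
--         short_check = {
--             "Universal Account Number Check":              "UAN Check",
--             "Moonlighting Check":                          "Moonlighting",
--             "University Recognition check":                "Univ Recognition",
--             "Social Media Lite":                           "Social Media",
--             "Police Clearance Certificate Acknowledgement":"PCC Acknowledgement",
--             "Police Clearance Certificate":                "PCC",
--         }.get(check, check)
--         short_vtype = {
--             "DIGITAL":                        "Digital",
--             "PHYSICAL":                       "Physical",
--             "OFFICIAL":                       "Official",
--             "REGIONAL_PARTNER":               "Regional",
--             "UNIVERSAL_ACCOUNT_NUMBER_CHECK": "UAN",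
--         }.get(vtype, "")
--         return f"{short_check} ({short_vtype})" if short_vtype else short_check
--
--     labels = [abbrev(c) for c in combos]
--     lw = max(25, max(len(l) for l in labels) + 2)
--     sw = 7
--     tw = 7
--
--     sev_hdrs = [sev_short.get(s, s) for s in sevs]
--     header = f"{'Check':<{lw}}" + "".join(f"{h:>{sw}}" for h in sev_hdrs) + f"{'Total':>{tw}}"
--     sep    = "-" * len(header)
--
--     lines = ["```", header, sep]
--     grand_total = 0
--
--     for label, combo in zip(labels, combos):
--         row_total = sum(pivot[s].get(combo, 0) for s in sevs)
--         grand_total += row_total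
--         cells = "".join(
--             f"{pivot[s].get(combo, 0) or '-':>{sw}}" for s in sevs
--         )
--         lines.append(f"{label:<{lw}}{cells}{row_total:>{tw}}")
--
--     lines.append(sep)
--     col_tots = "".join(
--         f"{sum(pivot[s].get(c, 0) for c in combos):>{sw}}" for s in sevs
--     )
--     lines.append(f"{'Total':<{lw}}{col_tots}{grand_total:>{tw}}")
--     lines.append("```")
--
--     return "\n".join(lines), grand_total
-- ===== SOURCE B (Python) =====
-- SEV_ORDER = ["0-1", "2 - 3", "4 - 5", "6 - 7", "8 - 14", "15 - 30", "31 - 90", "90+"]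
--
-- def format_pivot_table(pivot):
--     combos = sorted(set(c for sev_data in pivot.values() for c in sev_data))
--     sevs   = [s for s in SEV_ORDER if s in pivot]
--
--     sev_short = {
--         "0-1": "0-1", "2 - 3": "2-3", "4 - 5": "4-5", "6 - 7": "6-7",
--         "8 - 14": "8-14", "15 - 30": "15-30", "31 - 90": "31-90", "90+": "90+",
--     }
--
--     def abbrev(combo):
--         check, _, vtype = combo.partition(" | ")
--         short_check = {
--             "Universal Account Number Check":              "UAN Check",
--             "Moonlighting Check":                          "Moonlighting",
--             "University Recognition check":                "Univ Recognition",
--             "Social Media Lite":                           "Social Media",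
--             "Police Clearance Certificate Acknowledgement":"PCC Acknowledgement",
--             "Police Clearance Certificate":                "PCC",
--         }.get(check, check)
--         short_vtype = {
--             "DIGITAL":                        "Digital",
--             "PHYSICAL":                       "Physical",
--             "OFFICIAL":                       "Official",
--             "REGIONAL_PARTNER":               "Regional",
--             "UNIVERSAL_ACCOUNT_NUMBER_CHECK": "UAN",
--         }.get(vtype, "")
--         return f"{short_check} ({short_vtype})" if short_vtype else short_check
--
--     labels = [abbrev(c) for c in combos]
--     lw = max(25, max(len(l) for l in labels) + 2)
--     sw = 7
--     tw = 7
--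
--     # Materialise the numeric grid once; every total is derived from it.
--     matrix     = [[pivot[s].get(c, 0) for s in sevs] for c in combos]
--     row_totals = [sum(row) for row in matrix]
--     col_totals = [sum(row[j] for row in matrix) for j in range(len(sevs))]
--     grand_total = sum(row_totals)
--
--     header = f"{'Check':<{lw}}" + "".join(f"{sev_short.get(s, s):>{sw}}" for s in sevs) + f"{'Total':>{tw}}"
--     sep    = "-" * len(header)
--
--     body = [
--         f"{label:<{lw}}" + "".join(f"{v or '-':>{sw}}" for v in row) + f"{t:>{tw}}"
--         for label, row, t in zip(labels, matrix, row_totals)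
--     ]
--     total_row = (f"{'Total':<{lw}}"
--                  + "".join(f"{t:>{sw}}" for t in col_totals)
--                  + f"{grand_total:>{tw}}")
--
--     lines = ["```", header, sep, *body, sep, total_row, "```"]
--     return "\n".join(lines), grand_total
-- ===== Notes on version B (the rewrite author's own statement) =====
-- stated objective: alternative
-- what changed: B materialises the numeric grid once as an explicit matrix indexed by combo x severity and derives row totals, column totals and the grand total from that matrix (column totals by transposed index summation), building all body lines by mapping over the grid, instead of A's accumulator loop that re-scans the pivot dict separately for each row total, each cell and again for every column total.
import Mathlib
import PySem

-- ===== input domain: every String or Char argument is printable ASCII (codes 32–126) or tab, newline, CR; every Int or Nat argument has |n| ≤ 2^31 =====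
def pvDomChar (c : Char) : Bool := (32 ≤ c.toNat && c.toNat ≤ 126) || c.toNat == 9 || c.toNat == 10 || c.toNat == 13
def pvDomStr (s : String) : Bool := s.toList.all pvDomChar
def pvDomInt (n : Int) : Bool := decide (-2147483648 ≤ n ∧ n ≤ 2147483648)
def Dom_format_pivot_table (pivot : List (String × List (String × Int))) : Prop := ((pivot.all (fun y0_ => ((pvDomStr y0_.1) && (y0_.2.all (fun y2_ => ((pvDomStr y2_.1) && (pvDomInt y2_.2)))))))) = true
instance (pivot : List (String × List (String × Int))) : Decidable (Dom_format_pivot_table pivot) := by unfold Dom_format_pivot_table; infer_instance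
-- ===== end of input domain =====

-- B restructures A: it materialises the pivot into an explicit combo×severity matrix once and
-- derives row/column/grand totals and every printed line from that grid ('alternative', not faster).

-- shared transliterations of code both Pythons contain verbatim (SEV_ORDER, sev_short, abbrev,
-- the `x or '-'` cell rendering, f-string padding, dict lookups)
def pvSEV_ORDER : List String := ["0-1", "2 - 3", "4 - 5", "6 - 7", "8 - 14", "15 - 30", "31 - 90", "90+"]

-- f"{s:<{w}}" / f"{s:>{w}}" on List Char (space padding, no truncation)
def pvPadR (cs : List Char) (w : Nat) : List Char := cs ++ List.replicate (w - cs.length) ' '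
def pvPadL (cs : List Char) (w : Nat) : List Char := List.replicate (w - cs.length) ' ' ++ cs

def pvSevShort (s : String) : List Char :=
  (if s = "0-1" then "0-1" else if s = "2 - 3" then "2-3" else if s = "4 - 5" then "4-5"
   else if s = "6 - 7" then "6-7" else if s = "8 - 14" then "8-14" else if s = "15 - 30" then "15-30"
   else if s = "31 - 90" then "31-90" else if s = "90+" then "90+" else s).toList

-- combo.partition(" | ") : (before, after); hand port of str.partition, exact: PySem.Chars.find
-- returns the index of the FIRST occurrence or -1
def pvPartition (cs sep : List Char) : List Char × List Char :=
  let i := PySem.Chars.find cs sep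
  if i = -1 then (cs, []) else (cs.take i.toNat, cs.drop (i.toNat + sep.length))

def pvAbbrev (combo : String) : List Char :=
  let p := pvPartition combo.toList " | ".toList
  let check := p.1
  let vtype := p.2
  let short_check :=
    if check = "Universal Account Number Check".toList then "UAN Check".toList
    else if check = "Moonlighting Check".toList then "Moonlighting".toList
    else if check = "University Recognition check".toList then "Univ Recognition".toList
    else if check = "Social Media Lite".toList then "Social Media".toList
    else if check = "Police Clearance Certificate Acknowledgement".toList then "PCC Acknowledgement".toList
    else if check = "Police Clearance Certificate".toList then "PCC".toList
    else check
  let short_vtype :=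
    if vtype = "DIGITAL".toList then "Digital".toList
    else if vtype = "PHYSICAL".toList then "Physical".toList
    else if vtype = "OFFICIAL".toList then "Official".toList
    else if vtype = "REGIONAL_PARTNER".toList then "Regional".toList
    else if vtype = "UNIVERSAL_ACCOUNT_NUMBER_CHECK".toList then "UAN".toList
    else []
  if short_vtype ≠ [] then short_check ++ " (".toList ++ short_vtype ++ [')'] else short_check

-- sorted(set(c for sev_data in pivot.values() for c in sev_data))
def pvCombos (pivot : List (String × List (String × Int))) : List String :=
  PySem.List.sorted (PySem.Set.ofList (pivot.flatMap (fun sd => sd.2.map (·.1)))) (fun x => x) false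

-- [s for s in SEV_ORDER if s in pivot]
def pvSevs (pivot : List (String × List (String × Int))) : List String :=
  pvSEV_ORDER.filter (fun s => (PySem.Dict.mk pivot).contains s)

-- pivot[s].get(c, 0)  (pivot[s] is total here: only called with s ∈ keys)
def pvCell (pivot : List (String × List (String × Int))) (s c : String) : Int :=
  PySem.Dict.getD (PySem.Dict.mk (((PySem.Dict.mk pivot).get? s).getD [])) c 0

-- f"{v or '-':>7}"'s payload: '-' for 0, str(v) otherwise
def pvCellStr (v : Int) : List Char := if v = 0 then ['-'] else PySem.Int.toChars v

-- ===== PORT A =====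
def format_pivot_table (pivot : List (String × List (String × Int))) : String × Int :=
  let combos := pvCombos pivot
  let sevs := pvSevs pivot
  let labels := combos.map pvAbbrev
  -- max(...) on an empty labels raises ValueError in Python: excluded by Pre_; .getD 0 only totalises
  let lw := max 25 (((PySem.List.max? (labels.map (·.length)) (fun x => x)).getD 0) + 2)
  let header := pvPadR "Check".toList lw ++ sevs.flatMap (fun s => pvPadL (pvSevShort s) 7)
                  ++ pvPadL "Total".toList 7
  let sep := List.replicate header.length '-'
  let st := (labels.zip combos).foldl
    (fun (acc : List (List Char) × Int) lc =>
      (acc.1 ++ [pvPadR lc.1 lw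
                  ++ sevs.flatMap (fun s => pvPadL (pvCellStr (pvCell pivot s lc.2)) 7)
                  ++ pvPadL (PySem.Int.toChars ((sevs.map (fun s => pvCell pivot s lc.2)).foldl (· + ·) 0)) 7],
       acc.2 + (sevs.map (fun s => pvCell pivot s lc.2)).foldl (· + ·) 0))
    (["```".toList, header, sep], 0)
  let colTots := sevs.flatMap
    (fun s => pvPadL (PySem.Int.toChars ((combos.map (fun c => pvCell pivot s c)).foldl (· + ·) 0)) 7)
  let lines := st.1 ++ [sep, pvPadR "Total".toList lw ++ colTots ++ pvPadL (PySem.Int.toChars st.2) 7, "```".toList]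
  (String.mk (PySem.Chars.join ['\n'] lines), st.2)

-- ===== PORT B =====
def format_pivot_table_alt (pivot : List (String × List (String × Int))) : String × Int :=
  let combos := pvCombos pivot
  let sevs := pvSevs pivot
  let labels := combos.map pvAbbrev
  let lw := max 25 (((PySem.List.max? (labels.map (·.length)) (fun x => x)).getD 0) + 2)
  let matrix := combos.map (fun c => sevs.map (fun s => pvCell pivot s c))
  let rowTotals := matrix.map (fun r => r.foldl (· + ·) 0)
  -- row[j] is always in range (every row has length sevs.length); .getD only totalises
  let colTotals := (List.range sevs.length).map (fun j => (matrix.map (fun r => r.getD j 0)).foldl (· + ·) 0)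
  let grand := rowTotals.foldl (· + ·) 0
  let header := pvPadR "Check".toList lw ++ sevs.flatMap (fun s => pvPadL (pvSevShort s) 7)
                  ++ pvPadL "Total".toList 7
  let sep := List.replicate header.length '-'
  let body := (labels.zip (matrix.zip rowTotals)).map
    (fun lrt => pvPadR lrt.1 lw ++ lrt.2.1.flatMap (fun v => pvPadL (pvCellStr v) 7)
                  ++ pvPadL (PySem.Int.toChars lrt.2.2) 7)
  let totalRow := pvPadR "Total".toList lw ++ colTotals.flatMap (fun t => pvPadL (PySem.Int.toChars t) 7)
                  ++ pvPadL (PySem.Int.toChars grand) 7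
  let lines := ["```".toList, header, sep] ++ body ++ [sep, totalRow, "```".toList]
  (String.mk (PySem.Chars.join ['\n'] lines), grand)

-- ===== PRECONDITION & SPEC =====
-- Pre_ excludes exactly the pivots with no combo at all (every inner dict empty), on which the
-- Python A raises ValueError at max() over the empty label sequence (B's Python raises there too).
def Pre_format_pivot_table (pivot : List (String × List (String × Int))) : Prop :=
  ∃ p ∈ pivot, p.2 ≠ ([] : List (String × Int))
instance (pivot : List (String × List (String × Int))) : Decidable (Pre_format_pivot_table pivot) := by
  unfold Pre_format_pivot_table; infer_instance

def pvWitness_format_pivot_table : (List (String × List (String × Int))) :=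
  [("0-1", [("Moonlighting Check | DIGITAL", 2)])]

def Spec_format_pivot_table (pivot : List (String × List (String × Int))) (out : String × Int) : Prop := out = format_pivot_table_alt pivot
instance (pivot : List (String × List (String × Int))) (out : String × Int) : Decidable (Spec_format_pivot_table pivot out) := by unfold Spec_format_pivot_table; infer_instance

-- ===== CLAIM (what is proved, stated in full; the proofs are below) =====
def Claim_equal_format_pivot_table : Prop := ∀ (pivot : List (String × List (String × Int))), Dom_format_pivot_table pivot → Pre_format_pivot_table pivot → Spec_format_pivot_table pivot (format_pivot_table pivot)

-- ===== LEMMAS AND PROOFS =====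

-- running an Int foldl-add from a ≠ 0 start
theorem pv_foldl_add (l : List Int) : ∀ a : Int, l.foldl (· + ·) a = a + l.foldl (· + ·) 0 := by
  induction l with
  | nil => intro a; simp
  | cons x t ih => intro a; simp only [List.foldl_cons]; rw [ih (a + x), ih (0 + x)]; ring

-- A's accumulator loop over the rows = initial lines ++ the mapped rows, total = sum of row totals
theorem pv_foldl_rows {α : Type} (xs : List α) (row : α → List Char) (tot : α → Int) :
    ∀ (l0 : List (List Char)) (g0 : Int),
      xs.foldl (fun (acc : List (List Char) × Int) x => (acc.1 ++ [row x], acc.2 + tot x)) (l0, g0)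
        = (l0 ++ xs.map row, g0 + (xs.map tot).foldl (· + ·) 0) := by
  induction xs with
  | nil => intro l0 g0; simp
  | cons x t ih =>
      intro l0 g0
      simp only [List.foldl_cons, List.map_cons, ih]
      rw [pv_foldl_add (t.map tot) (0 + tot x)]
      refine Prod.ext ?_ ?_
      · simp
      · simp only []; ring

-- zips of maps over the same list collapse to one map
theorem pv_zip_map_left {α β : Type} (l : List α) (f : α → β) :
    (l.map f).zip l = l.map (fun x => (f x, x)) := by
  induction l with
  | nil => rfl
  | cons x t ih => simp [ih]

-- a map over a list = a map over its index range
theorem pv_map_eq_range_map {α β : Type} [Inhabited α] (l : List α) (f : α → β) :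
    l.map f = (List.range l.length).map (fun j => f (l.getD j default)) := by
  apply List.ext_getElem
  · simp
  · intro i h1 h2
    simp [List.getD_eq_getElem?_getD, List.getElem?_eq_getElem (by simpa using h2)]

theorem pv_colTotals (pivot : List (String × List (String × Int))) (combos sevs : List String) :
    (List.range sevs.length).map
        (fun j => (combos.map (fun c => (sevs.map (fun s => pvCell pivot s c)).getD j 0)).foldl (· + ·) 0)
      = sevs.map (fun s => (combos.map (fun c => pvCell pivot s c)).foldl (· + ·) 0) := by
  rw [pv_map_eq_range_map sevs (fun s => (combos.map (fun c => pvCell pivot s c)).foldl (· + ·) 0)]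
  apply List.map_congr_left
  intro j hj
  simp only [List.mem_range] at hj
  congr 1
  apply List.map_congr_left
  intro c _
  simp [List.getD_eq_getElem?_getD, List.getElem?_map,
        List.getElem?_eq_getElem (show j < sevs.length from hj)]

theorem format_pivot_table_eq (pivot : List (String × List (String × Int))) :
    format_pivot_table pivot = format_pivot_table_alt pivot := by
  unfold format_pivot_table format_pivot_table_alt
  simp only [pv_foldl_rows, pv_zip_map_left, List.zip_map', List.map_map, Function.comp_def, List.flatMap_map,
             pv_colTotals, zero_add]

-- ===== VERDICT (by name: the statement is the Claim_ definition above) =====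
theorem format_pivot_table_spec : Claim_equal_format_pivot_table := by
  intro pivot _ _
  show _ = _
  exact format_pivot_table_eq pivot
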